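-- pv_equiv track=rewrite | github.com/Studies-Alison-Juliano/geek_university_curso_python | projetos_mariana/escritora.py | dicio_sucessores
-- ===== SOURCE A (Python) =====
-- def dicio_sucessores(lst):
--     '''(list) -> dict
--
--     RECEBE uma lista `lst`.
--     RETORNA um dicionário em que
--
--         - as __chaves__ são os itens que ocorrem em lst e
--         - o  __valor__ associado a cada chave é a lista dos
--           itens que ocorrem imediatamente após a chave na lista lst.
--
--     Por convenção a lista correspondente ao valor do último item
--     na lst (=lst[-1]) contém o primeiro item da lista (=lst[0]).
--
--     Se a `lst` é a lista vazia a função deve retornar o dicionário vazio.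
--     '''
--     dic = {}
--
--     # Adicionando primeiro elemento do dicionario a partir do ultimo elemento da lst
--     if lst.count(lst[-1]) == 1:
--         dic[lst[-1]] = [lst[0]]
--     else:
--         dic[lst[-1]] = [lst[0]]
--         for i, e in enumerate(lst):
--             if i == len(lst) - 1:
--                 break
--             elif e == lst[-1]:
--                 dic[lst[-1]].append(lst[i + 1])
--
--     # Resto do dicionario
--     for i, e in enumerate(lst):
--         if i == len(lst) - 1:
--             break
--         if lst.count(e) == 1:
--             dic[e] = [lst[i + 1]]
--         elif lst.count(e) > 1 and dic.get(e) is None: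
--             dic[e] = []
--             for i1, e1 in enumerate(lst):
--                 if i1 == len(lst) - 1:
--                     break
--                 if e1 == e:
--                     dic[e].append(lst[i1 + 1])
--
--     return dic
-- ===== SOURCE B (Python) =====
-- def dicio_sucessores(lst):
--     # Single pass: the last element's list starts with the first element; then
--     # each adjacent pair (x, y) appends y to x's list.
--     dic = {lst[-1]: [lst[0]]}
--     for a, b in zip(lst, lst[1:]):
--         dic.setdefault(a, []).append(b)
--     return dic
-- ===== Notes on version B (the rewrite author's own statement) =====
-- stated objective: faster
-- what changed: A rescans the whole list per distinct element (count() plus nested enumerate loops); B builds the dict in one linear pass over adjacent pairs, seeding the dict with the last element mapped to a list holding the first element, then doing setdefault/append for each pair.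
import Mathlib
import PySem

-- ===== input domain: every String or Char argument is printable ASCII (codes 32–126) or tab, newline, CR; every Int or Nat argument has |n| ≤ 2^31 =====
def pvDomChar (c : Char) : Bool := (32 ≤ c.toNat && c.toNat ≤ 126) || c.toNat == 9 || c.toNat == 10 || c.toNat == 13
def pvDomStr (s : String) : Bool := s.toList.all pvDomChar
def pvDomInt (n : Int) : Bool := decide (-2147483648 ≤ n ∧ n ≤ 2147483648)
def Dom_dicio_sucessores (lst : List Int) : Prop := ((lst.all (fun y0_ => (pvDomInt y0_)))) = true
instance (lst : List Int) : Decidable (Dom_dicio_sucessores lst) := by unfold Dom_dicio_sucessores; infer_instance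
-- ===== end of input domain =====

-- B replaces A's quadratic count/rescan passes by one linear pass over adjacent pairs (objective: faster; measured).

-- ===== PORT A =====
-- Literal transliteration of A.  'break' at i == len(lst)-1 is rendered as skipping that
-- enumerate entry: it is the unique final entry, so nothing follows the break point.
def dicio_sucessores (lst : List Int) : List (Int × List Int) :=
  match PySem.List.pyGet? lst (-1), PySem.List.pyGet? lst 0 with
  | some last, some first =>
    let dic : PySem.Dict Int (List Int) :=
      if PySem.List.count lst last = 1 then
        PySem.Dict.empty.insert last [first]
      else
        (PySem.List.enumerate lst).foldl
          (fun d ie =>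
            if ie.1 = PySem.List.len lst - 1 then d
            else if ie.2 = last then
              d.modify last [] (fun v => v ++ [PySem.List.pyGetD lst (ie.1 + 1) 0])
            else d)
          (PySem.Dict.empty.insert last [first])
    let dic := (PySem.List.enumerate lst).foldl
      (fun d ie =>
        if ie.1 = PySem.List.len lst - 1 then d
        else if PySem.List.count lst ie.2 = 1 then
          d.insert ie.2 [PySem.List.pyGetD lst (ie.1 + 1) 0]
        else if 1 < PySem.List.count lst ie.2 ∧ d.get? ie.2 = none then
          (PySem.List.enumerate lst).foldl
            (fun d2 ie1 =>
              if ie1.1 = PySem.List.len lst - 1 then d2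
              else if ie1.2 = ie.2 then
                d2.modify ie.2 [] (fun v => v ++ [PySem.List.pyGetD lst (ie1.1 + 1) 0])
              else d2)
            (d.insert ie.2 [])
        else d)
      dic
    dic.items
  | _, _ => []

-- ===== PORT B =====
def dicio_sucessores_alt (lst : List Int) : List (Int × List Int) :=
  match PySem.List.pyGet? lst (-1) with
  | none => []
  | some last =>
    match PySem.List.pyGet? lst 0 with
    | none => []
    | some first =>
      let dic : PySem.Dict Int (List Int) := PySem.Dict.empty.insert last [first]
      let dic := (lst.zip (PySem.List.slice lst (some 1) none)).foldl
        (fun d p => (d.setdefault p.1 []).modify p.1 [] (fun v => v ++ [p.2])) dic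
      dic.items

-- ===== PRECONDITION & SPEC =====
-- A indexes the last element, which raises IndexError on the empty list; Pre_ excludes exactly that input.
def Pre_dicio_sucessores (lst : List Int) : Prop := lst ≠ []
instance (lst : List Int) : Decidable (Pre_dicio_sucessores lst) := by unfold Pre_dicio_sucessores; infer_instance
def pvWitness_dicio_sucessores : List Int := [1, 2, 1, 3]

def Spec_dicio_sucessores (lst : List Int) (out : List (Int × List Int)) : Prop := out = dicio_sucessores_alt lst
instance (lst : List Int) (out : List (Int × List Int)) : Decidable (Spec_dicio_sucessores lst out) := by unfold Spec_dicio_sucessores; infer_instance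

-- ===== CLAIM (what is proved, stated in full; the proofs are below) =====
def Claim_equal_dicio_sucessores : Prop := ∀ (lst : List Int), Dom_dicio_sucessores lst → Pre_dicio_sucessores lst → Spec_dicio_sucessores lst (dicio_sucessores lst)

-- ===== LEMMAS AND PROOFS =====


def sucOf (q : List (Int × Int)) (e : Int) : List Int :=
  (q.filter (fun p => p.1 == e)).map Prod.snd

def firstKeys : List (Int × Int) → List Int → List Int
  | [], _ => []
  | p :: t, seen => if p.1 ∈ seen then firstKeys t seen else p.1 :: firstKeys t (p.1 :: seen)

lemma sucOf_cons (p : Int × Int) (t : List (Int × Int)) (e : Int) :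
    sucOf (p :: t) e = if p.1 = e then p.2 :: sucOf t e else sucOf t e := by
  simp [sucOf, List.filter_cons]
  split_ifs <;> simp_all

lemma sucOf_append (q r : List (Int × Int)) (e : Int) :
    sucOf (q ++ r) e = sucOf q e ++ sucOf r e := by
  simp [sucOf, List.filter_append]

lemma sucOf_eq_nil (q : List (Int × Int)) (e : Int) (h : e ∉ q.map Prod.fst) :
    sucOf q e = [] := by
  simp only [sucOf, List.map_eq_nil_iff, List.filter_eq_nil_iff]
  intro p hp
  simp only [beq_iff_eq]
  rintro rfl
  exact h (List.mem_map.mpr ⟨p, hp, rfl⟩)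

lemma mem_firstKeys (q : List (Int × Int)) (s : List Int) (k : Int) :
    k ∈ firstKeys q s ↔ k ∈ q.map Prod.fst ∧ k ∉ s := by
  induction q generalizing s with
  | nil => simp [firstKeys]
  | cons p t ih =>
    simp only [firstKeys]
    split_ifs with hm
    · rw [ih]
      simp only [List.map_cons, List.mem_cons]
      constructor
      · rintro ⟨h1, h2⟩; exact ⟨Or.inr h1, h2⟩
      · rintro ⟨h1 | h1, h2⟩
        · exact absurd (h1 ▸ hm) h2
        · exact ⟨h1, h2⟩
    · simp only [List.mem_cons, ih, List.map_cons]
      by_cases hk : k = p.1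
      · subst hk; tauto
      · tauto

lemma nodup_firstKeys (q : List (Int × Int)) (s : List Int) : (firstKeys q s).Nodup := by
  induction q generalizing s with
  | nil => simp [firstKeys]
  | cons p t ih =>
    simp only [firstKeys]
    split_ifs with hm
    · exact ih s
    · refine List.nodup_cons.mpr ⟨fun hmem => ?_, ih _⟩
      exact ((mem_firstKeys _ _ _).mp hmem).2 (List.mem_cons_self)

lemma firstKeys_congr (q : List (Int × Int)) (s1 s2 : List Int)
    (h : ∀ x, x ∈ s1 ↔ x ∈ s2) : firstKeys q s1 = firstKeys q s2 := by
  induction q generalizing s1 s2 with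
  | nil => rfl
  | cons p t ih =>
    simp only [firstKeys]
    by_cases hm : p.1 ∈ s1
    · rw [if_pos hm, if_pos ((h p.1).mp hm)]; exact ih _ _ h
    · rw [if_neg hm, if_neg (fun c => hm ((h p.1).mpr c))]
      congr 1
      exact ih _ _ (fun x => by simp [List.mem_cons, h x])

lemma firstKeys_append (u v : List (Int × Int)) (s : List Int) :
    firstKeys (u ++ v) s = firstKeys u s ++ firstKeys v (u.map Prod.fst ++ s) := by
  induction u generalizing s with
  | nil => simp [firstKeys]
  | cons p t ih =>
    simp only [List.cons_append, firstKeys]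
    split_ifs with hm
    · rw [ih]
      congr 1
      exact firstKeys_congr _ _ _ (fun x => by
        simp only [List.map_cons, List.cons_append, List.mem_cons, List.mem_append]
        by_cases hx : x = p.1
        · subst hx; tauto
        · tauto)
    · rw [List.cons_append, ih]
      congr 2
      exact firstKeys_congr _ _ _ (fun x => by
        simp only [List.mem_cons, List.map_cons, List.cons_append, List.mem_append]
        tauto)

lemma foldB_items (q : List (Int × Int)) (d : PySem.Dict Int (List Int)) (hnd : d.keys.Nodup) :
    (q.foldl (fun d p => (d.setdefault p.1 []).modify p.1 [] (fun v => v ++ [p.2])) d).items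
      = d.items.map (fun kv => (kv.1, kv.2 ++ sucOf q kv.1))
        ++ (firstKeys q d.keys).map (fun k => (k, sucOf q k)) := by
  induction q generalizing d with
  | nil =>
    simp only [List.foldl_nil, firstKeys, List.map_nil, List.append_nil]
    have h0 : ∀ kv ∈ d.items, ((kv.1 : Int), kv.2 ++ sucOf [] kv.1) = id kv := by
      intro kv _; simp [sucOf]
    rw [List.map_congr_left h0, List.map_id]
  | cons p t ih =>
    rw [List.foldl_cons]
    by_cases hc : d.contains p.1 = true
    · -- key already present
      rw [PySem.Dict.setdefault_of_contains d [] hc]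
      have hmod : d.modify p.1 [] (fun v => v ++ [p.2]) = d.insert p.1 (d.getD p.1 [] ++ [p.2]) := rfl
      rw [hmod]
      have hnd' : (d.insert p.1 (d.getD p.1 [] ++ [p.2])).keys.Nodup :=
        PySem.Dict.nodup_keys_insert d _ _ hnd
      rw [ih _ hnd']
      have hkeys : (d.insert p.1 (d.getD p.1 [] ++ [p.2])).keys = d.keys := by
        rw [PySem.Dict.keys_insert_of_contains d _ hc]
      have hcmem : p.1 ∈ d.keys := by
        have := PySem.Dict.contains_eq_decide_mem_keys d p.1
        rw [hc] at this
        simpa using this.symm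
      rw [PySem.Dict.items_insert_of_contains d _ hc, hkeys, List.map_map]
      congr 1
      · apply List.map_congr_left
        rintro ⟨k1, k2⟩ hkv
        simp only [Function.comp_apply]
        by_cases hk : k1 = p.1
        · subst hk
          have hval := PySem.Dict.getD_of_mem_items d hkv hnd ([] : List Int)
          simp [sucOf_cons, hval, List.append_assoc]
        · have hne : ¬ (p.1 = k1) := fun h => hk h.symm
          simp [hk, sucOf_cons, hne]
      · rw [firstKeys, if_pos hcmem]
        apply List.map_congr_left
        intro k hk
        have hknot : k ∉ d.keys := ((mem_firstKeys _ _ _).mp hk).2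
        rw [sucOf_cons, if_neg (fun h : p.1 = k => hknot (by rw [← h]; exact hcmem))]
    · -- new key
      have hcf : d.contains p.1 = false := by simpa using hc
      rw [PySem.Dict.setdefault_of_not_contains d [] hcf]
      have hmod : (d.insert p.1 []).modify p.1 [] (fun v => v ++ [p.2])
          = d.insert p.1 [p.2] := by
        show (d.insert p.1 []).insert p.1 (((d.insert p.1 []).getD p.1 []) ++ [p.2])
            = d.insert p.1 [p.2]
        rw [PySem.Dict.getD_insert_self, PySem.Dict.insert_insert_self]
        rfl
      rw [hmod]
      have hpk : p.1 ∉ d.keys := by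
        have := PySem.Dict.contains_eq_decide_mem_keys d p.1
        rw [hcf] at this
        simpa using this.symm
      have hnd' : (d.insert p.1 [p.2]).keys.Nodup := PySem.Dict.nodup_keys_insert d _ _ hnd
      rw [ih _ hnd']
      rw [PySem.Dict.items_insert_of_not_contains d _ hcf,
          PySem.Dict.keys_insert_of_not_contains d _ hcf]
      rw [List.map_append, List.append_assoc]
      congr 1
      · apply List.map_congr_left
        intro kv hkv
        have : kv.1 ≠ p.1 := fun h => hpk (h ▸ PySem.Dict.mem_keys_of_mem_items d hkv)
        rw [sucOf_cons, if_neg (fun h => this h.symm)]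
      · rw [firstKeys]
        rw [if_neg (by simpa using hpk)]
        simp only [List.map_cons, List.map_nil, List.nil_append, List.cons_append, sucOf_cons]
        congr 1
        rw [firstKeys_congr t (d.keys ++ [p.1]) (p.1 :: d.keys) (by intro x; simp [or_comm])]
        apply List.map_congr_left
        intro k hk
        have hknot : k ∉ p.1 :: d.keys := ((mem_firstKeys _ _ _).mp hk).2
        rw [if_neg (fun h => hknot (by subst h; exact List.mem_cons_self))]
lemma zip_tail_eq (u : List Int) (a : Int) :
    (u ++ [a]).zip ((u ++ [a]).tail)
      = (PySem.List.enumerate u 0).map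
          (fun ie => (ie.2, PySem.List.pyGetD (u ++ [a]) (ie.1 + 1) 0)) := by
  apply List.ext_getElem
  · simp [List.length_zip, PySem.List.length_enumerate]
  · intro k h1 h2
    have hk : k < u.length := by
      simpa [PySem.List.length_enumerate] using h2
    have hk1 : k + 1 < (u ++ [a]).length := by simp; omega
    rw [List.getElem_zip, List.getElem_map, PySem.List.getElem_enumerate]
    simp only [zero_add]
    have : ((k : Int) + 1) = ((k + 1 : Nat) : Int) := by push_cast; ring
    rw [this, PySem.List.pyGetD_natCast, List.getD_eq_getElem _ _ hk1]
    have ht : (u ++ [a]).tail[k]'(by simpa using hk) = (u ++ [a])[k + 1] := by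
      rw [List.getElem_tail]
    rw [ht]
    congr 1
    exact (List.getElem_append_left hk)

lemma map_fst_zip_tail (u : List Int) (a : Int) :
    ((u ++ [a]).zip ((u ++ [a]).tail)).map Prod.fst = u := by
  rw [zip_tail_eq, List.map_map]
  have : (Prod.fst ∘ fun ie : Int × Int => (ie.2, PySem.List.pyGetD (u ++ [a]) (ie.1 + 1) 0))
      = Prod.snd := rfl
  rw [this, PySem.List.map_snd_enumerate]

lemma guarded_fold (u : List Int) (a : Int)
    (G : PySem.Dict Int (List Int) → (Int × Int) → PySem.Dict Int (List Int))
    (d : PySem.Dict Int (List Int)) :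
    (PySem.List.enumerate (u ++ [a])).foldl
        (fun d ie => if ie.1 = PySem.List.len (u ++ [a]) - 1 then d
                     else G d (ie.2, PySem.List.pyGetD (u ++ [a]) (ie.1 + 1) 0)) d
      = ((u ++ [a]).zip ((u ++ [a]).tail)).foldl G d := by
  rw [PySem.List.enumerate_append, List.foldl_append]
  have hlen : PySem.List.len (u ++ [a]) - 1 = (u.length : Int) := by
    simp [PySem.List.len]
  have henum : PySem.List.enumerate [a] (0 + (u.length : Int)) = [((0 : Int) + u.length, a)] := rfl
  rw [henum, List.foldl_cons, List.foldl_nil, if_pos (by rw [hlen]; ring)]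
  rw [zip_tail_eq, List.foldl_map]
  apply PySem.List.foldl_congr_mem
  intro acc ie hie
  rw [PySem.List.mem_enumerate_iff] at hie
  obtain ⟨k, hk, rfl⟩ := hie
  rw [if_neg]
  rw [hlen]
  simp only [zero_add]
  intro hc
  have : k = u.length := by exact_mod_cast hc
  omega
lemma fold_modApp (q : List (Int × Int)) (c : Int) (d : PySem.Dict Int (List Int))
    (hc : d.contains c = true) (hnd : d.keys.Nodup) :
    (q.foldl (fun d2 p => if p.1 = c then d2.modify c [] (fun v => v ++ [p.2]) else d2) d).items
      = d.items.map (fun kv => if kv.1 = c then (kv.1, kv.2 ++ sucOf q c) else kv) := by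
  induction q generalizing d with
  | nil =>
    simp only [List.foldl_nil, sucOf, List.filter_nil, List.map_nil, List.append_nil]
    have h0 : ∀ kv ∈ d.items, (if kv.1 = c then (kv.1, kv.2) else kv) = id kv := by
      intro kv _; split_ifs <;> rfl
    rw [List.map_congr_left h0, List.map_id]
  | cons p t ih =>
    rw [List.foldl_cons]
    by_cases hp : p.1 = c
    · rw [if_pos hp]
      have hmod : d.modify c [] (fun v => v ++ [p.2]) = d.insert c (d.getD c [] ++ [p.2]) := rfl
      rw [hmod]
      rw [ih _ (PySem.Dict.contains_insert_self d c _) (by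
        have := PySem.Dict.nodup_keys_insert d c (d.getD c [] ++ [p.2]) hnd
        exact this)]
      rw [PySem.Dict.items_insert_of_contains d _ hc, List.map_map]
      apply List.map_congr_left
      rintro ⟨k1, k2⟩ hkv
      simp only [Function.comp_apply]
      by_cases hk : k1 = c
      · subst hk
        have hval : k2 = d.getD k1 [] := by
          exact (PySem.Dict.getD_of_mem_items d hkv hnd []).symm
        rw [sucOf_cons, if_pos hp, ← hval]
        simp [List.append_assoc]
      · rw [sucOf_cons, if_pos hp]
        simp [hk]
    · rw [if_neg hp, ih d hc hnd]
      apply List.map_congr_left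
      intro kv _
      rw [sucOf_cons, if_neg hp]

lemma foldA_main (u : List Int) (a f : Int) (pre q : List (Int × Int))
    (hpq : (u ++ [a]).zip ((u ++ [a]).tail) = pre ++ q)
    (d : PySem.Dict Int (List Int))
    (hitems : d.items
      = (a, f :: sucOf ((u ++ [a]).zip ((u ++ [a]).tail)) a)
        :: (firstKeys pre [a]).map (fun k => (k, sucOf ((u ++ [a]).zip ((u ++ [a]).tail)) k))) :
    (q.foldl (fun d p =>
        if PySem.List.count (u ++ [a]) p.1 = 1 then d.insert p.1 [p.2]
        else if 1 < PySem.List.count (u ++ [a]) p.1 ∧ d.get? p.1 = none then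
          (((u ++ [a]).zip ((u ++ [a]).tail)).foldl
            (fun d2 p2 => if p2.1 = p.1 then d2.modify p.1 [] (fun v => v ++ [p2.2]) else d2)
            (d.insert p.1 []))
        else d) d).items
      = (a, f :: sucOf ((u ++ [a]).zip ((u ++ [a]).tail)) a)
        :: (firstKeys (pre ++ q) [a]).map (fun k => (k, sucOf ((u ++ [a]).zip ((u ++ [a]).tail)) k)) := by
  induction q generalizing pre d with
  | nil => rw [List.foldl_nil, List.append_nil]; exact hitems
  | cons p t ih =>
    set L := u ++ [a] with hL
    set ps := L.zip L.tail with hps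
    have hfst : ps.map Prod.fst = u := map_fst_zip_tail u a
    have hu : u = pre.map Prod.fst ++ p.1 :: t.map Prod.fst := by
      rw [← hfst, hpq]; simp
    have hkeys' : d.keys = a :: firstKeys pre [a] := by
      show d.items.map Prod.fst = _
      rw [hitems]
      simp only [List.map_cons, List.map_map]
      congr 1
      have hid : (Prod.fst ∘ fun k : Int => ((k, sucOf ps k) : Int × List Int)) = id := rfl
      rw [hid, List.map_id]
    have hanotfk : a ∉ firstKeys pre [a] := by
      intro hmem
      exact ((mem_firstKeys _ _ _).mp hmem).2 (List.mem_cons_self)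
    have hnd : d.keys.Nodup := by
      rw [hkeys']
      exact List.nodup_cons.mpr ⟨hanotfk, nodup_firstKeys _ _⟩
    have hcnt : List.count p.1 L
        = List.count p.1 (pre.map Prod.fst) + 1 + List.count p.1 (t.map Prod.fst)
          + List.count p.1 [a] := by
      rw [hL, List.count_append, hu, List.count_append, List.count_cons]
      simp only [beq_self_eq_true, if_true]
      omega
    rw [List.foldl_cons]
    by_cases h1 : PySem.List.count L p.1 = 1
    · rw [if_pos h1]
      rw [PySem.List.count_eq] at h1
      have hza : List.count p.1 [a] = 0 := by omega
      have hzpre : List.count p.1 (pre.map Prod.fst) = 0 := by omega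
      have hzt : List.count p.1 (t.map Prod.fst) = 0 := by omega
      have hna : p.1 ≠ a := by
        intro h; rw [h] at hza; simp at hza
      have hpre0 : p.1 ∉ pre.map Prod.fst := by
        rw [← List.count_eq_zero]; exact hzpre
      have ht0 : p.1 ∉ t.map Prod.fst := by
        rw [← List.count_eq_zero]; exact hzt
      have hnotkey : p.1 ∉ d.keys := by
        rw [hkeys']
        intro hmem
        rcases List.mem_cons.mp hmem with h | h
        · exact hna h
        · exact hpre0 ((mem_firstKeys _ _ _).mp h).1
      have hcont : d.contains p.1 = false := by
        rw [PySem.Dict.contains_eq_decide_mem_keys]; simpa using hnotkey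
      have hS : sucOf ps p.1 = [p.2] := by
        rw [hpq, sucOf_append, sucOf_cons, if_pos rfl, sucOf_eq_nil pre _ hpre0,
          sucOf_eq_nil t _ ht0]
        rfl
      have hfk : firstKeys (pre ++ [p]) [a] = firstKeys pre [a] ++ [p.1] := by
        rw [firstKeys_append]
        congr 1
        rw [firstKeys]
        rw [if_neg (by
          intro hmem
          rcases List.mem_append.mp hmem with h | h
          · exact hpre0 h
          · exact hna (by simpa using h))]
        rfl
      have hitems' : (d.insert p.1 [p.2]).items
          = (a, f :: sucOf ps a)
            :: (firstKeys (pre ++ [p]) [a]).map (fun k => (k, sucOf ps k)) := by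
        rw [PySem.Dict.items_insert_of_not_contains d _ hcont, hitems, hfk]
        simp [hS]
      have := ih (pre ++ [p]) (by rw [hpq]; simp) (d.insert p.1 [p.2]) hitems'
      rw [this, List.append_assoc]
      simp
    · by_cases h2 : 1 < PySem.List.count L p.1 ∧ d.get? p.1 = none
      · rw [if_neg h1, if_pos h2]
        have hnotkey : p.1 ∉ d.keys :=
          (PySem.Dict.get?_eq_none_iff_not_mem_keys d p.1).mp h2.2
        have hna : p.1 ≠ a := by
          intro h; apply hnotkey; rw [hkeys', h]; exact List.mem_cons_self
        have hpre0 : p.1 ∉ pre.map Prod.fst := by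
          intro hmem
          apply hnotkey
          rw [hkeys']
          exact List.mem_cons_of_mem _ ((mem_firstKeys pre [a] p.1).mpr
            ⟨hmem, by simpa using hna⟩)
        have hcont : d.contains p.1 = false := by
          rw [PySem.Dict.contains_eq_decide_mem_keys]; simpa using hnotkey
        have hcont1 : (d.insert p.1 []).contains p.1 = true :=
          PySem.Dict.contains_insert_self d p.1 []
        have hnd1 : (d.insert p.1 []).keys.Nodup := PySem.Dict.nodup_keys_insert d _ _ hnd
        have hitems1 : (d.insert p.1 []).items = d.items ++ [(p.1, [])] :=
          PySem.Dict.items_insert_of_not_contains d _ hcont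
        have hitems2 : ((ps.foldl
            (fun d2 p2 => if p2.1 = p.1 then d2.modify p.1 [] (fun v => v ++ [p2.2]) else d2)
            (d.insert p.1 []))).items = d.items ++ [(p.1, sucOf ps p.1)] := by
          rw [fold_modApp ps p.1 _ hcont1 hnd1, hitems1, List.map_append]
          congr 1
          · have h0 : ∀ kv ∈ d.items,
                (if kv.1 = p.1 then ((kv.1 : Int), kv.2 ++ sucOf ps p.1) else kv) = id kv := by
              intro kv hkv
              rw [if_neg (fun h : kv.1 = p.1 => hnotkey
                (by rw [← h]; exact PySem.Dict.mem_keys_of_mem_items d hkv))]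
              rfl
            rw [List.map_congr_left h0, List.map_id]
          · simp
        have hfk : firstKeys (pre ++ [p]) [a] = firstKeys pre [a] ++ [p.1] := by
          rw [firstKeys_append]
          congr 1
          rw [firstKeys]
          rw [if_neg (by
            intro hmem
            rcases List.mem_append.mp hmem with h | h
            · exact hpre0 h
            · exact hna (by simpa using h))]
          rfl
        have hitems' : ((ps.foldl
            (fun d2 p2 => if p2.1 = p.1 then d2.modify p.1 [] (fun v => v ++ [p2.2]) else d2)
            (d.insert p.1 []))).items
            = (a, f :: sucOf ps a)
              :: (firstKeys (pre ++ [p]) [a]).map (fun k => (k, sucOf ps k)) := by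
          rw [hitems2, hitems, hfk]
          simp
        have := ih (pre ++ [p]) (by rw [hpq]; simp) _ hitems'
        rw [this, List.append_assoc]
        simp
      · rw [if_neg h1, if_neg h2]
        have hmemu : p.1 ∈ u := by rw [hu]; simp
        have hge1 : 1 ≤ List.count p.1 L := by omega
        have hne1 : List.count p.1 L ≠ 1 := by
          rw [← PySem.List.count_eq]; exact h1
        have hgt : 1 < PySem.List.count L p.1 := by
          rw [PySem.List.count_eq]; omega
        have hsome : ¬ d.get? p.1 = none := fun hn => h2 ⟨hgt, hn⟩
        have hmemkeys : p.1 ∈ d.keys := by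
          by_contra hnk
          exact hsome ((PySem.Dict.get?_eq_none_iff_not_mem_keys d p.1).mpr hnk)
        have hmem : p.1 = a ∨ p.1 ∈ pre.map Prod.fst := by
          rw [hkeys'] at hmemkeys
          rcases List.mem_cons.mp hmemkeys with h | h
          · exact Or.inl h
          · exact Or.inr ((mem_firstKeys _ _ _).mp h).1
        have hfk : firstKeys (pre ++ [p]) [a] = firstKeys pre [a] := by
          rw [firstKeys_append]
          have : firstKeys [p] (pre.map Prod.fst ++ [a]) = [] := by
            rw [firstKeys]
            rw [if_pos (by
              rcases hmem with h | h
              · exact List.mem_append.mpr (Or.inr (by simp [h]))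
              · exact List.mem_append.mpr (Or.inl h))]
            rfl
          rw [this, List.append_nil]
        have := ih (pre ++ [p]) (by rw [hpq]; simp) d (by rw [hitems, hfk])
        rw [this, List.append_assoc]
        simp

-- beta-normal instances of guarded_fold matching the ports' loops syntactically
lemma guardedA1 (u : List Int) (a c : Int) (d : PySem.Dict Int (List Int)) :
    (PySem.List.enumerate (u ++ [a])).foldl
        (fun d2 ie => if ie.1 = PySem.List.len (u ++ [a]) - 1 then d2
          else if ie.2 = c then
            d2.modify c [] (fun v => v ++ [PySem.List.pyGetD (u ++ [a]) (ie.1 + 1) 0])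
          else d2) d
      = ((u ++ [a]).zip ((u ++ [a]).tail)).foldl
          (fun d2 p => if p.1 = c then d2.modify c [] (fun v => v ++ [p.2]) else d2) d :=
  guarded_fold u a (fun d2 p => if p.1 = c then d2.modify c [] (fun v => v ++ [p.2]) else d2) d

lemma guardedA2 (u : List Int) (a : Int) (d : PySem.Dict Int (List Int)) :
    (PySem.List.enumerate (u ++ [a])).foldl
        (fun d ie =>
          if ie.1 = PySem.List.len (u ++ [a]) - 1 then d
          else if PySem.List.count (u ++ [a]) ie.2 = 1 then
            d.insert ie.2 [PySem.List.pyGetD (u ++ [a]) (ie.1 + 1) 0]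
          else if 1 < PySem.List.count (u ++ [a]) ie.2 ∧ d.get? ie.2 = none then
            (PySem.List.enumerate (u ++ [a])).foldl
              (fun d2 ie1 =>
                if ie1.1 = PySem.List.len (u ++ [a]) - 1 then d2
                else if ie1.2 = ie.2 then
                  d2.modify ie.2 [] (fun v => v ++ [PySem.List.pyGetD (u ++ [a]) (ie1.1 + 1) 0])
                else d2)
              (d.insert ie.2 [])
          else d) d
      = ((u ++ [a]).zip ((u ++ [a]).tail)).foldl
          (fun d p =>
            if PySem.List.count (u ++ [a]) p.1 = 1 then d.insert p.1 [p.2]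
            else if 1 < PySem.List.count (u ++ [a]) p.1 ∧ d.get? p.1 = none then
              (((u ++ [a]).zip ((u ++ [a]).tail)).foldl
                (fun d2 p2 => if p2.1 = p.1 then d2.modify p.1 [] (fun v => v ++ [p2.2]) else d2)
                (d.insert p.1 []))
            else d) d := by
  refine Eq.trans (guarded_fold u a (fun d p =>
      if PySem.List.count (u ++ [a]) p.1 = 1 then d.insert p.1 [p.2]
      else if 1 < PySem.List.count (u ++ [a]) p.1 ∧ d.get? p.1 = none then
        (PySem.List.enumerate (u ++ [a])).foldl
          (fun d2 ie1 =>
            if ie1.1 = PySem.List.len (u ++ [a]) - 1 then d2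
            else if ie1.2 = p.1 then
              d2.modify p.1 [] (fun v => v ++ [PySem.List.pyGetD (u ++ [a]) (ie1.1 + 1) 0])
            else d2)
          (d.insert p.1 [])
      else d) d) ?_
  apply PySem.List.foldl_congr_mem
  intro acc p _
  by_cases h1 : PySem.List.count (u ++ [a]) p.1 = 1
  · rw [if_pos h1, if_pos h1]
  · rw [if_neg h1, if_neg h1]
    by_cases h2 : 1 < PySem.List.count (u ++ [a]) p.1 ∧ acc.get? p.1 = none
    · rw [if_pos h2, if_pos h2, guardedA1]
    · rw [if_neg h2, if_neg h2]

lemma dicio_eq_alt (lst : List Int) (hpre : lst ≠ []) :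
    dicio_sucessores lst = dicio_sucessores_alt lst := by
  obtain ⟨u, a, rfl⟩ : ∃ u a, lst = u ++ [a] := by
    rcases List.eq_nil_or_concat lst with h | ⟨u, a, h⟩
    · exact absurd h hpre
    · exact ⟨u, a, by simpa using h⟩
  have h1 : PySem.List.pyGet? (u ++ [a]) (-1) = some a := by
    rw [PySem.List.pyGet?_neg_one, List.getLast?_concat]
  cases hf0 : PySem.List.pyGet? (u ++ [a]) 0 with
  | none =>
    rw [PySem.List.pyGet?_zero] at hf0
    simp at hf0
  | some f =>
    set L := u ++ [a] with hL
    set ps := L.zip L.tail with hps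
    -- shared starting dict
    have hd0items : (PySem.Dict.empty.insert a [f]).items = [(a, [f])] := rfl
    have hd0keys : (PySem.Dict.empty.insert a [f]).keys = [a] := rfl
    have hd0nodup : (PySem.Dict.empty.insert a [f]).keys.Nodup := by
      rw [hd0keys]; simp
    have hd0contains : (PySem.Dict.empty.insert a [f]).contains a = true :=
      PySem.Dict.contains_insert_self _ a _
    -- B side
    have hslice : PySem.List.slice L (some 1) none = L.tail := by
      rw [PySem.List.slice_from L (by norm_num : (0:Int) ≤ 1)]
      norm_num [List.drop_one]
    have hB : dicio_sucessores_alt L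
        = (a, f :: sucOf ps a) :: (firstKeys ps [a]).map (fun k => (k, sucOf ps k)) := by
      simp only [dicio_sucessores_alt, h1, hf0, hslice]
      rw [foldB_items ps _ hd0nodup, hd0items, hd0keys]
      simp only [List.map_cons, List.map_nil, List.singleton_append]
    -- A side
    have hA : dicio_sucessores L
        = (a, f :: sucOf ps a) :: (firstKeys ps [a]).map (fun k => (k, sucOf ps k)) := by
      simp only [dicio_sucessores, h1, hf0]
      rw [guardedA1 u a a, guardedA2 u a]
      have hD1 : (if PySem.List.count L a = 1 then PySem.Dict.empty.insert a [f]
          else ps.foldl (fun d2 p => if p.1 = a then d2.modify a [] (fun v => v ++ [p.2]) else d2)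
            (PySem.Dict.empty.insert a [f])).items = [(a, f :: sucOf ps a)] := by
        split_ifs with hc
        · rw [hd0items]
          have hcnt : List.count a u = 0 := by
            rw [PySem.List.count_eq, hL, List.count_append] at hc
            simp at hc
            omega
          have hnot : a ∉ ps.map Prod.fst := by
            rw [hps, hL, map_fst_zip_tail, ← List.count_eq_zero]
            exact hcnt
          rw [sucOf_eq_nil ps a hnot]
        · rw [fold_modApp ps a _ hd0contains hd0nodup, hd0items]
          simp
      rw [foldA_main u a f [] ps (by simp only [List.nil_append]; rfl) _
        (by rw [hD1]; simp only [firstKeys, List.map_nil]; rfl)]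
      simp only [List.nil_append]
      rfl
    rw [hA, hB]

-- ===== VERDICT (by name: the statement is the Claim_ definition above) =====
theorem dicio_sucessores_spec : Claim_equal_dicio_sucessores := by
  intro lst _ hpre
  unfold Spec_dicio_sucessores
  exact dicio_eq_alt lst hpre
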